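-- pv_equiv track=rewrite | github.com/duri-duri/DuRiWorkspace | backups/current_backup/duri_control/app/services/log_service.py | _clean_log_message
-- ===== SOURCE A (Python) =====
-- def _clean_log_message(message: str) -> str:
--     """로그 메시지 정리"""
--     # 불필요한 접두사 제거
--     prefixes_to_remove = [
--         "INFO:", "WARNING:", "ERROR:", "DEBUG:",
--         "INFO -", "WARNING -", "ERROR -", "DEBUG -"
--     ]
--
--     clean_message = message
--     for prefix in prefixes_to_remove:
--         if clean_message.startswith(prefix):
--             clean_message = clean_message[len(prefix):].strip()
--             break
--
--     return clean_message
-- ===== SOURCE B (Python) =====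
-- def _clean_log_message(message: str) -> str:
--     """로그 메시지 정리"""
--     levels = ("INFO", "WARNING", "ERROR", "DEBUG")
--     for sep in (":", " -"):
--         i = message.find(sep)
--         if i != -1 and message[:i] in levels:
--             return message[i + len(sep):].strip()
--     return message
-- ===== Notes on version B (the rewrite author's own statement) =====
-- stated objective: idiomatic
-- what changed: Instead of scanning a list of eight literal level+separator prefixes with startswith, B locates the first occurrence of each separator (':' then ' -') with str.find and checks whether the text before it is one of the four log levels, stripping the remainder on a match.
import Mathlib
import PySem

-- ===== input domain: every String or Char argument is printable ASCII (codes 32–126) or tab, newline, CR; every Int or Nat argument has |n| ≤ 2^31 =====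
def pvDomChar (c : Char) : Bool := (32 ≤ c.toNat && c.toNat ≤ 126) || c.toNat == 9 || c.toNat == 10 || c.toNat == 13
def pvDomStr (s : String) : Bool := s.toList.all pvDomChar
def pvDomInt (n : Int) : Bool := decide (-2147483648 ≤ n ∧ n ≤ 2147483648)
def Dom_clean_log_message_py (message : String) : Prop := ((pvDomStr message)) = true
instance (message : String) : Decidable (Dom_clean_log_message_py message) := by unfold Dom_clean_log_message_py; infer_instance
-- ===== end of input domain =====

-- B replaces A's scan over eight literal prefixes by locating the first separator (":" or " -")
-- with str.find and checking that the text before it is a log level (objective: idiomatic/alternative).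

-- ===== PORT A =====
-- A's for-loop with break: recursion over the prefix list, stopping at the first match.
def cleanLoopA (m : String) : List String → String
  | [] => m
  | p :: rest =>
    if PySem.Str.startswith m p then
      PySem.Str.strip (PySem.Str.slice m (some (PySem.Str.len p)) none)
    else cleanLoopA m rest

def clean_log_message_py (message : String) : String :=
  cleanLoopA message
    ["INFO:", "WARNING:", "ERROR:", "DEBUG:",
     "INFO -", "WARNING -", "ERROR -", "DEBUG -"]

-- ===== PORT B =====
-- one iteration of B's for-loop over the two separators: 'some r' models the early return
def trySepB (message : String) (sep : String) : Option String :=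
  -- i = message.find(sep), written inline
  if PySem.Str.find message sep ≠ -1 ∧
      PySem.Str.slice message none (some (PySem.Str.find message sep)) ∈
        ["INFO", "WARNING", "ERROR", "DEBUG"] then
    some (PySem.Str.strip
      (PySem.Str.slice message (some (PySem.Str.find message sep + PySem.Str.len sep)) none))
  else none

def clean_log_message_py_alt (message : String) : String :=
  match trySepB message ":" with
  | some r => r
  | none =>
    match trySepB message " -" with
    | some r => r
    | none => message

-- ===== PRECONDITION & SPEC =====
def Spec_clean_log_message_py (message : String) (out : String) : Prop := out = clean_log_message_py_alt message
instance (message : String) (out : String) : Decidable (Spec_clean_log_message_py message out) := by unfold Spec_clean_log_message_py; infer_instance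

-- ===== CLAIM (what is proved, stated in full; the proofs are below) =====
def Claim_equal_clean_log_message_py : Prop := ∀ (message : String), Dom_clean_log_message_py message → Spec_clean_log_message_py message (clean_log_message_py message)

-- ===== LEMMAS AND PROOFS =====

-- find locates the separator exactly after lv when lv does not contain the separator's first char
lemma find_prefix_sep (lv sep t : List Char) (c : Char) (hc : sep.head? = some c)
    (hlv : c ∉ lv) : PySem.Chars.find (lv ++ (sep ++ t)) sep = (lv.length : Int) := by
  have hsepne : sep ≠ [] := by intro h; simp [h] at hc
  have hpre : sep <+: (lv ++ (sep ++ t)).drop lv.length := by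
    simp
  have h0 : 0 ≤ PySem.Chars.find (lv ++ (sep ++ t)) sep := by
    rw [PySem.Chars.find_nonneg_iff]
    exact ⟨lv, t, by simp⟩
  obtain ⟨hp, hmin⟩ := PySem.Chars.find_spec h0
  set f := PySem.Chars.find (lv ++ (sep ++ t)) sep with hf
  have hle : f.toNat ≤ lv.length := by
    by_contra hgt
    exact hmin lv.length (by omega) hpre
  have hge : ¬ f.toNat < lv.length := by
    intro hlt
    obtain ⟨u, hu⟩ := hp
    have hhead : ((lv ++ (sep ++ t)).drop f.toNat).head? = some c := by
      rw [← hu]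
      cases sep with
      | nil => exact absurd rfl hsepne
      | cons a s => simp at hc; simp [hc]
    rw [List.drop_append_of_le_length (by omega)] at hhead
    have hhd : (lv.drop f.toNat).head? = some c := by
      cases hdl : lv.drop f.toNat with
      | nil => have := List.drop_eq_nil_iff.mp hdl; omega
      | cons a s => simpa [hdl] using hhead
    have hcmem : c ∈ lv :=
      List.mem_of_mem_drop (List.mem_of_mem_head? hhd)
    exact hlv hcmem
  omega

-- where find succeeds, the text before it followed by the separator is a prefix of the string
lemma prefix_of_find (L sep : List Char) (h0 : 0 ≤ PySem.Chars.find L sep) :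
    (L.take (PySem.Chars.find L sep).toNat ++ sep) <+: L := by
  obtain ⟨hp, _⟩ := PySem.Chars.find_spec h0
  obtain ⟨u, hu⟩ := hp
  exact ⟨u, by rw [List.append_assoc, hu, List.take_append_drop]⟩

-- B's loop body fires when a level followed by the separator is a prefix
lemma trySepB_pos (m lv sep : String) (c : Char) (k : Int) (hc : sep.toList.head? = some c)
    (hlv : c ∉ lv.toList) (hmem : lv ∈ (["INFO", "WARNING", "ERROR", "DEBUG"] : List String))
    (hk : (lv.toList.length : Int) + PySem.Str.len sep = k)
    (h : (lv.toList ++ sep.toList) <+: m.toList) :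
    trySepB m sep = some (PySem.Str.strip (PySem.Str.slice m (some k) none)) := by
  obtain ⟨t, ht⟩ := h
  have hL : m.toList = lv.toList ++ (sep.toList ++ t) := by rw [← ht, List.append_assoc]
  have hfind : PySem.Str.find m sep = (lv.toList.length : Int) := by
    rw [PySem.Str.find_eq, hL]
    exact find_prefix_sep _ _ _ c hc hlv
  have hslice : PySem.Str.slice m none (some (lv.toList.length : Int)) = lv := by
    rw [← String.toList_inj, PySem.Str.toList_slice, PySem.Chars.slice_eq_listSlice,
      PySem.List.slice_to_natCast, hL, List.take_append_of_le_length le_rfl, List.take_length]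
  unfold trySepB
  simp only [hfind]
  rw [if_pos ⟨by omega, by rw [hslice]; exact hmem⟩, hk]

-- B's loop body does not fire when no level+separator prefix is present
lemma trySepB_neg (m sep : String)
    (h : ∀ lv ∈ (["INFO", "WARNING", "ERROR", "DEBUG"] : List String),
      ¬ ((lv.toList ++ sep.toList) <+: m.toList)) :
    trySepB m sep = none := by
  unfold trySepB
  split_ifs with hcond
  · exfalso
    obtain ⟨hne, hmem⟩ := hcond
    have h0 : (0 : Int) ≤ PySem.Str.find m sep := by
      have := PySem.Chars.neg_one_le_find m.toList sep.toList
      rw [PySem.Str.find_eq] at hne ⊢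
      omega
    have hpre := prefix_of_find m.toList sep.toList (by rwa [PySem.Str.find_eq] at h0)
    have hslice : (PySem.Str.slice m none (some (PySem.Str.find m sep))).toList =
        m.toList.take (PySem.Chars.find m.toList sep.toList).toNat := by
      rw [PySem.Str.toList_slice, PySem.Chars.slice_eq_listSlice, PySem.List.slice_to _ h0,
        PySem.Str.find_eq]
    have key : ∀ lv : String, PySem.Str.slice m none (some (PySem.Str.find m sep)) = lv →
        (lv.toList ++ sep.toList) <+: m.toList := by
      intro lv hlv
      have h2 := congrArg String.toList hlv
      rw [hslice] at h2
      rw [← h2]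
      exact hpre
    simp only [List.mem_cons, List.not_mem_nil, or_false] at hmem
    rcases hmem with h1 | h1 | h1 | h1
    · exact h "INFO" (by simp) (key _ h1)
    · exact h "WARNING" (by simp) (key _ h1)
    · exact h "ERROR" (by simp) (key _ h1)
    · exact h "DEBUG" (by simp) (key _ h1)
  · rfl

-- a startswith hypothesis as a prefix fact on toList
lemma sw_prefix (m p : String) (h : PySem.Str.startswith m p = true) : p.toList <+: m.toList := by
  rw [PySem.Str.startswith_eq, PySem.Chars.startswith_iff] at h
  exact h

lemma sw_not_prefix (m p : String) (h : ¬ PySem.Str.startswith m p = true) :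
    ¬ p.toList <+: m.toList := by
  rw [PySem.Str.startswith_eq, PySem.Chars.startswith_iff] at h
  exact h

-- ===== VERDICT (by name: the statement is the Claim_ definition above) =====
theorem clean_log_message_py_spec : Claim_equal_clean_log_message_py := by
  intro m _
  show clean_log_message_py m = clean_log_message_py_alt m
  simp only [clean_log_message_py, cleanLoopA, clean_log_message_py_alt]
  by_cases h1 : PySem.Str.startswith m "INFO:" = true
  · have hb := trySepB_pos m "INFO" ":" ':' 5 (by decide) (by decide) (by decide) (by decide)
      (by simpa using sw_prefix m _ h1)
    rw [if_pos h1, hb]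
    have hlenA : PySem.Str.len "INFO:" = 5 := by decide
    rw [hlenA]
  by_cases h2 : PySem.Str.startswith m "WARNING:" = true
  · have hb := trySepB_pos m "WARNING" ":" ':' 8 (by decide) (by decide) (by decide) (by decide)
      (by simpa using sw_prefix m _ h2)
    rw [if_neg h1, if_pos h2, hb]
    have hlenA : PySem.Str.len "WARNING:" = 8 := by decide
    rw [hlenA]
  by_cases h3 : PySem.Str.startswith m "ERROR:" = true
  · have hb := trySepB_pos m "ERROR" ":" ':' 6 (by decide) (by decide) (by decide) (by decide)
      (by simpa using sw_prefix m _ h3)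
    rw [if_neg h1, if_neg h2, if_pos h3, hb]
    have hlenA : PySem.Str.len "ERROR:" = 6 := by decide
    rw [hlenA]
  by_cases h4 : PySem.Str.startswith m "DEBUG:" = true
  · have hb := trySepB_pos m "DEBUG" ":" ':' 6 (by decide) (by decide) (by decide) (by decide)
      (by simpa using sw_prefix m _ h4)
    rw [if_neg h1, if_neg h2, if_neg h3, if_pos h4, hb]
    have hlenA : PySem.Str.len "DEBUG:" = 6 := by decide
    rw [hlenA]
  have hcolon : trySepB m ":" = none := by
    apply trySepB_neg
    intro lv hlv
    simp only [List.mem_cons, List.not_mem_nil, or_false] at hlv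
    rcases hlv with h | h | h | h <;> subst h
    · simpa using sw_not_prefix m _ h1
    · simpa using sw_not_prefix m _ h2
    · simpa using sw_not_prefix m _ h3
    · simpa using sw_not_prefix m _ h4
  by_cases h5 : PySem.Str.startswith m "INFO -" = true
  · have hb := trySepB_pos m "INFO" " -" ' ' 6 (by decide) (by decide) (by decide) (by decide)
      (by simpa using sw_prefix m _ h5)
    rw [if_neg h1, if_neg h2, if_neg h3, if_neg h4, if_pos h5, hcolon, hb]
    have hlenA : PySem.Str.len "INFO -" = 6 := by decide
    rw [hlenA]
  by_cases h6 : PySem.Str.startswith m "WARNING -" = true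
  · have hb := trySepB_pos m "WARNING" " -" ' ' 9 (by decide) (by decide) (by decide) (by decide)
      (by simpa using sw_prefix m _ h6)
    rw [if_neg h1, if_neg h2, if_neg h3, if_neg h4, if_neg h5, if_pos h6, hcolon, hb]
    have hlenA : PySem.Str.len "WARNING -" = 9 := by decide
    rw [hlenA]
  by_cases h7 : PySem.Str.startswith m "ERROR -" = true
  · have hb := trySepB_pos m "ERROR" " -" ' ' 7 (by decide) (by decide) (by decide) (by decide)
      (by simpa using sw_prefix m _ h7)
    rw [if_neg h1, if_neg h2, if_neg h3, if_neg h4, if_neg h5, if_neg h6, if_pos h7, hcolon, hb]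
    have hlenA : PySem.Str.len "ERROR -" = 7 := by decide
    rw [hlenA]
  by_cases h8 : PySem.Str.startswith m "DEBUG -" = true
  · have hb := trySepB_pos m "DEBUG" " -" ' ' 7 (by decide) (by decide) (by decide) (by decide)
      (by simpa using sw_prefix m _ h8)
    rw [if_neg h1, if_neg h2, if_neg h3, if_neg h4, if_neg h5, if_neg h6, if_neg h7, if_pos h8,
      hcolon, hb]
    have hlenA : PySem.Str.len "DEBUG -" = 7 := by decide
    rw [hlenA]
  · have hdash : trySepB m " -" = none := by
      apply trySepB_neg
      intro lv hlv
      simp only [List.mem_cons, List.not_mem_nil, or_false] at hlv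
      rcases hlv with h | h | h | h <;> subst h
      · simpa using sw_not_prefix m _ h5
      · simpa using sw_not_prefix m _ h6
      · simpa using sw_not_prefix m _ h7
      · simpa using sw_not_prefix m _ h8
    rw [if_neg h1, if_neg h2, if_neg h3, if_neg h4, if_neg h5, if_neg h6, if_neg h7, if_neg h8,
      hcolon, hdash]
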